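-- pv_equiv track=rewrite | github.com/julianknutsen/packs | discord/scripts/discord_gateway_service.py | display_name_from_message
-- ===== SOURCE A (Python) =====
-- from typing import Any
--
-- def display_name_from_message(message: dict[str, Any]) -> str:
--     member = message.get("member") or {}
--     user = message.get("author") or {}
--     candidates: list[str] = []
--     for raw in (
--         member.get("nick"),
--         user.get("global_name"),
--         user.get("username"),
--     ):
--         if raw is None:
--             continue
--         value = str(raw).strip()
--         if value:
--             candidates.append(value)
--     for value in candidates:
--         normalized = " ".join(
--             value.replace("\r", " ").replace("\n", " ").replace("<", " ").replace(">", " ").split()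
--         )
--         if normalized:
--             return normalized
--     return "discord-user"
-- ===== SOURCE B (Python) =====
-- def _tokens(s):
--     # single-pass character-level tokenizer: words separated by whitespace or '<' / '>'
--     words = []
--     cur = []
--     for ch in s:
--         if ch.isspace() or ch in "<>":
--             if cur:
--                 words.append("".join(cur))
--                 cur = []
--         else:
--             cur.append(ch)
--     if cur:
--         words.append("".join(cur))
--     return words
--
--
-- def display_name_from_message(message):
--     member = message.get("member") or {}
--     author = message.get("author") or {}
--     for raw in (member.get("nick"), author.get("global_name"), author.get("username")):
--         if raw is None:
--             continue
--         words = _tokens(str(raw))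
--         if words:
--             return " ".join(words)
--     return "discord-user"
-- ===== Notes on version B (the rewrite author's own statement) =====
-- stated objective: alternative
-- what changed: Replaces A's string-rewriting pipeline (four replace() passes, strip(), split(), candidate list built then rescanned) with a single character-level state-machine tokenizer per source: one pass over the characters accumulates words separated by whitespace/'<'/'>' and the first source with any word is joined and returned; no replace/strip/split and no intermediate candidate list.
import Mathlib
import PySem

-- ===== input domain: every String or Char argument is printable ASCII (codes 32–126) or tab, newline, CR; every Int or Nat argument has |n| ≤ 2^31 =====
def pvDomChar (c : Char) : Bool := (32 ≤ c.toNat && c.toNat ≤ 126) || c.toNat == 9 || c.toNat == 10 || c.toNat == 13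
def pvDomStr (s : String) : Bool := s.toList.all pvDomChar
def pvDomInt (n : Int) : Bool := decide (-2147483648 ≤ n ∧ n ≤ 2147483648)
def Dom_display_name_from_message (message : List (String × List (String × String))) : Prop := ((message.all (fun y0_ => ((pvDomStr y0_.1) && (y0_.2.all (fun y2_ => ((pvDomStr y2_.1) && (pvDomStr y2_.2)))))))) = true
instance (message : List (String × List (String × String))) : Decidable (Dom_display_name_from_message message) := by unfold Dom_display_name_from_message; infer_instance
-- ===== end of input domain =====

-- B replaces A's string-rewriting pipeline (four replace passes, strip, split, a candidate
-- list built then rescanned) with a single character-level tokenizer pass per source;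
-- objective: alternative (same cost, different algorithm).

-- ===== PORT A =====
-- ' '.join(value.replace('\r',' ').replace('\n',' ').replace('<',' ').replace('>',' ').split())
def pvNormA (v : String) : String :=
  PySem.Str.join " " (PySem.Str.split₀ (PySem.Str.replace (PySem.Str.replace (PySem.Str.replace (PySem.Str.replace v "\r" " ") "\n" " ") "<" " ") ">" " "))

-- A's first loop body: append strip(raw) if non-empty, skip None
def pvStepA (acc : List String) (raw : Option String) : List String :=
  match raw with
  | none => acc
  | some r =>
      let value := PySem.Str.strip r
      if value ≠ "" then acc ++ [value] else acc

-- A's second loop: first candidate with non-empty normalization, else "discord-user"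
def pvScanA : List String → String
  | [] => "discord-user"
  | v :: rest =>
      let normalized := pvNormA v
      if normalized ≠ "" then normalized else pvScanA rest

def display_name_from_message (message : List (String × List (String × String))) : String :=
  let member := ((PySem.Dict.mk message).get? "member").getD []
  let user := ((PySem.Dict.mk message).get? "author").getD []
  let candidates : List String :=
    ([(PySem.Dict.mk member).get? "nick",
      (PySem.Dict.mk user).get? "global_name",
      (PySem.Dict.mk user).get? "username"] : List (Option String)).foldl
      pvStepA []
  pvScanA candidates

-- ===== PORT B =====
-- ch.isspace() or ch in "<>"
def pvP (c : Char) : Bool := PySem.Chars.isspace c || c == '<' || c == '>'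

-- the loop body of _tokens: on a separator flush cur (if non-empty), else extend cur
def pvTokStep (st : List (List Char) × List Char) (c : Char) : List (List Char) × List Char :=
  if pvP c then (if st.2.isEmpty then st else (st.1 ++ [st.2], [])) else (st.1, st.2 ++ [c])

-- the trailing 'if cur: words.append(...)'
def pvFinish (st : List (List Char) × List Char) : List (List Char) :=
  if st.2.isEmpty then st.1 else st.1 ++ [st.2]

-- _tokens(s)
def pvTokens (s : String) : List String :=
  (pvFinish (s.toList.foldl pvTokStep ([], []))).map String.ofList

-- B's loop over the three sources: first source with any word wins
def pvFirstName : List (Option String) → String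
  | [] => "discord-user"
  | none :: rest => pvFirstName rest
  | some r :: rest =>
      let ws := pvTokens r
      if ws.isEmpty then pvFirstName rest else PySem.Str.join " " ws

def display_name_from_message_alt (message : List (String × List (String × String))) : String :=
  let member := ((PySem.Dict.mk message).get? "member").getD []
  let author := ((PySem.Dict.mk message).get? "author").getD []
  pvFirstName
    [(PySem.Dict.mk member).get? "nick",
     (PySem.Dict.mk author).get? "global_name",
     (PySem.Dict.mk author).get? "username"]

-- ===== PRECONDITION & SPEC =====
def Spec_display_name_from_message (message : List (String × List (String × String))) (out : String) : Prop := out = display_name_from_message_alt message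
instance (message : List (String × List (String × String))) (out : String) : Decidable (Spec_display_name_from_message message out) := by unfold Spec_display_name_from_message; infer_instance

-- ===== CLAIM (what is proved, stated in full; the proofs are below) =====
def Claim_equal_display_name_from_message : Prop := ∀ (message : List (String × List (String × String))), Dom_display_name_from_message message → Spec_display_name_from_message message (display_name_from_message message)

-- ===== LEMMAS AND PROOFS =====

-- the composite of A's four per-character replacements
def pvG (c : Char) : Char :=
  (fun c => if c == '>' then ' ' else c)
    ((fun c => if c == '<' then ' ' else c)
      ((fun c => if c == '\n' then ' ' else c)
        ((fun c => if c == '\r' then ' ' else c) c)))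

theorem pvG_isspace (c : Char) : PySem.Chars.isspace (pvG c) = pvP c := by
  by_cases h1 : c = '\r'; · subst h1; decide
  by_cases h2 : c = '\n'; · subst h2; decide
  by_cases h3 : c = '<'; · subst h3; decide
  by_cases h4 : c = '>'; · subst h4; decide
  have hlt : (c == '<') = false := by simp [h3]
  have hgt : (c == '>') = false := by simp [h4]
  simp [pvG, pvP, h1, h2, h3, h4, hlt, hgt]

theorem pvG_id (c : Char) (h : pvP c = false) : pvG c = c := by
  simp only [pvP, Bool.or_eq_false_iff, beq_eq_false_iff_ne, ne_eq] at h
  obtain ⟨⟨hs, hlt⟩, hgt⟩ := h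
  have hr : ¬ c = '\r' := fun hh => by rw [hh] at hs; exact absurd hs (by decide)
  have hn : ¬ c = '\n' := fun hh => by rw [hh] at hs; exact absurd hs (by decide)
  simp [pvG, hr, hn, hlt, hgt]

theorem pvReplaceGo (a b : Char) :
    ∀ (l : List Char) (fuel : Nat) (acc : List Char), l.length ≤ fuel →
      PySem.Chars.replace.go [a] [b] fuel l acc
        = acc.reverse ++ l.map (fun c => if c == a then b else c) := by
  intro l
  induction l with
  | nil =>
      intro fuel acc _
      cases fuel <;> simp [PySem.Chars.replace.go]
  | cons c t ih =>
      intro fuel acc h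
      cases fuel with
      | zero => simp at h
      | succ f =>
          simp only [PySem.Chars.replace.go]
          by_cases hc : a = c
          · subst hc
            have : List.isPrefixOf [a] (a :: t) = true := by simp [List.isPrefixOf]
            rw [if_pos this]
            have hd : List.drop [a].length (a :: t) = t := by simp
            have hrv : [b].reverse ++ acc = b :: acc := by simp
            rw [hd, hrv, ih f (b :: acc) (by simpa using h)]
            simp
          · have : List.isPrefixOf [a] (c :: t) = false := by
              simp [List.isPrefixOf, beq_eq_false_iff_ne, hc]
            rw [if_neg (by simp [this])]
            rw [ih f (c :: acc) (by simpa using h)]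
            have hca : ¬ c = a := fun hh => hc hh.symm
            simp [hca]

theorem pvReplace_single (a b : Char) (l : List Char) :
    PySem.Chars.replace l [a] [b] = l.map (fun c => if c == a then b else c) := by
  unfold PySem.Chars.replace
  rw [if_neg (by simp)]
  rw [pvReplaceGo a b l l.length [] le_rfl]
  simp

theorem pvMapG (l : List Char) :
    ((((l.map (fun c => if c == '\r' then ' ' else c)).map
        (fun c => if c == '\n' then ' ' else c)).map
        (fun c => if c == '<' then ' ' else c)).map
        (fun c => if c == '>' then ' ' else c)) = l.map pvG := by
  simp only [List.map_map]
  apply List.map_congr_left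
  intro a _
  simp [pvG, Function.comp]

theorem pvSplitGo :
    ∀ (rest : List Char) (ws : List (List Char)) (cur : List Char),
      PySem.Chars.split₀.go (rest.map pvG) cur.reverse ws.reverse
        = pvFinish (rest.foldl pvTokStep (ws, cur)) := by
  intro rest
  induction rest with
  | nil =>
      intro ws cur
      simp only [List.map_nil, PySem.Chars.split₀.go, List.foldl_nil, pvFinish]
      by_cases h : cur = []
      · simp [h]
      · have h1 : cur.isEmpty = false := by simp [h]
        have h2 : cur.reverse.isEmpty = false := by simp [h]
        simp [h1, h2]
  | cons c t ih =>
      intro ws cur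
      simp only [List.map_cons, PySem.Chars.split₀.go, List.foldl_cons]
      rw [pvG_isspace]
      by_cases hp : pvP c = true
      · rw [if_pos hp]
        by_cases hc : cur = []
        · subst hc
          simpa [pvTokStep, hp] using ih ws []
        · have h1 : cur.reverse.isEmpty = false := by simp [hc]
          rw [if_neg (by simp [h1])]
          have h2 : cur.reverse.reverse :: ws.reverse = (ws ++ [cur]).reverse := by simp
          rw [h2]
          have := ih (ws ++ [cur]) []
          simp only [List.reverse_nil] at this
          rw [this]
          have hcur : cur.isEmpty = false := by simp [List.isEmpty_eq_false_iff, hc]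
          simp [pvTokStep, hp, hcur]
      · have hp' : pvP c = false := by simpa using hp
        rw [if_neg (by simp [hp'])]
        rw [pvG_id c hp']
        have h3 : c :: cur.reverse = (cur ++ [c]).reverse := by simp
        rw [h3, ih ws (cur ++ [c])]
        simp [pvTokStep, hp']

theorem pvFoldl_lstrip (l : List Char) :
    (List.dropWhile PySem.Chars.isspace l).foldl pvTokStep ([], [])
      = l.foldl pvTokStep ([], []) := by
  induction l with
  | nil => rfl
  | cons c t ih =>
      by_cases h : PySem.Chars.isspace c = true
      · have hd : List.dropWhile PySem.Chars.isspace (c :: t)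
            = List.dropWhile PySem.Chars.isspace t := by simp [List.dropWhile_cons, h]
        rw [hd, ih, List.foldl_cons]
        have hst : pvTokStep ([], []) c = ([], []) := by simp [pvTokStep, pvP, h]
        rw [hst]
      · simp [List.dropWhile_cons, h]

theorem pvFinish_allP (t : List Char) (h : ∀ c ∈ t, pvP c = true) :
    ∀ st, pvFinish (t.foldl pvTokStep st) = pvFinish st := by
  induction t with
  | nil => intro st; rfl
  | cons c r ih =>
      intro st
      have hc : pvP c = true := h c (by simp)
      have hr : ∀ c ∈ r, pvP c = true := fun x hx => h x (by simp [hx])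
      simp only [List.foldl_cons]
      rw [ih hr]
      by_cases he : st.2.isEmpty = true
      · simp [pvTokStep, hc, he]
      · have he' : st.2.isEmpty = false := by simpa using he
        simp [pvTokStep, hc, he', pvFinish]

theorem pvFinish_strip (l : List Char) :
    pvFinish ((PySem.Chars.strip l).foldl pvTokStep ([], []))
      = pvFinish (l.foldl pvTokStep ([], [])) := by
  unfold PySem.Chars.strip PySem.Chars.rstrip
  set m := PySem.Chars.lstrip l with hm
  have hdecomp : m = (List.dropWhile PySem.Chars.isspace m.reverse).reverse
      ++ (List.takeWhile PySem.Chars.isspace m.reverse).reverse := by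
    have h0 := List.takeWhile_append_dropWhile (p := PySem.Chars.isspace) (l := m.reverse)
    rw [← List.reverse_append, h0, List.reverse_reverse]
  have htail : ∀ c ∈ (List.takeWhile PySem.Chars.isspace m.reverse).reverse, pvP c = true := by
    intro c hc
    rw [List.mem_reverse] at hc
    have := List.mem_takeWhile_imp hc
    simp [pvP, this]
  calc pvFinish ((List.dropWhile PySem.Chars.isspace m.reverse).reverse.foldl pvTokStep ([], []))
      = pvFinish (m.foldl pvTokStep ([], [])) := by
        conv_rhs => rw [hdecomp]
        rw [List.foldl_append, pvFinish_allP _ htail]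
    _ = pvFinish (l.foldl pvTokStep ([], [])) := by
        rw [hm]; unfold PySem.Chars.lstrip; rw [pvFoldl_lstrip]

theorem pvWords_ne_nil_fold (l : List Char) :
    ∀ st : List (List Char) × List Char, (∀ w ∈ st.1, w ≠ []) →
      ∀ w ∈ (l.foldl pvTokStep st).1, w ≠ [] := by
  induction l with
  | nil => intro st h; exact h
  | cons c t ih =>
      intro st h
      apply ih
      unfold pvTokStep
      by_cases hp : pvP c = true
      · by_cases he : st.2.isEmpty = true
        · simpa [hp, he] using h
        · have he' : st.2.isEmpty = false := by simpa using he
          rw [if_pos hp, if_neg (by simp [he'])]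
          intro w hw
          rcases List.mem_append.mp hw with h1 | h2
          · exact h w h1
          · simp at h2; subst h2; exact List.isEmpty_eq_false_iff.mp he'
      · have hp' : pvP c = false := by simpa using hp
        simpa [hp'] using h

theorem pvWords_ne_nil (l : List Char) :
    ∀ w ∈ pvFinish (l.foldl pvTokStep ([], [])), w ≠ [] := by
  intro w hw
  have hfold := pvWords_ne_nil_fold l ([], []) (by simp)
  unfold pvFinish at hw
  by_cases he : (l.foldl pvTokStep ([], [])).2.isEmpty = true
  · rw [if_pos he] at hw; exact hfold w hw
  · have he' : (l.foldl pvTokStep ([], [])).2.isEmpty = false := by simpa using he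
    rw [he'] at hw; simp at hw
    rcases hw with h1 | h2
    · exact hfold w h1
    · subst h2; exact List.isEmpty_eq_false_iff.mp he'

theorem pvJoin_ne_nil (ws : List (List Char)) (h : ∀ w ∈ ws, w ≠ []) (hne : ws ≠ []) :
    PySem.Chars.join [' '] ws ≠ [] := by
  match ws, hne with
  | [w], _ =>
      rw [PySem.Chars.join_singleton]
      exact h w (by simp)
  | w :: w' :: rest, _ =>
      have hw : w ≠ [] := h w (by simp)
      rw [PySem.Chars.join_cons_cons]
      simp [hw]

-- the two sides, per source string
theorem pvNorm_eq (r : String) :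
    pvNormA (PySem.Str.strip r) = PySem.Str.join " " (pvTokens r) := by
  apply String.toList_inj.mp
  unfold pvNormA pvTokens
  rw [PySem.Str.toList_join]
  rw [PySem.Str.toList_join]
  rw [PySem.Str.split₀_map_toList]
  rw [PySem.Str.toList_replace, PySem.Str.toList_replace, PySem.Str.toList_replace,
      PySem.Str.toList_replace, PySem.Str.toList_strip]
  have hrep : ∀ (l : List Char),
      PySem.Chars.replace (PySem.Chars.replace (PySem.Chars.replace
        (PySem.Chars.replace l "\r".toList " ".toList) "\n".toList " ".toList)
        "<".toList " ".toList) ">".toList " ".toList = l.map pvG := by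
    intro l
    have e1 : ("\r".toList : List Char) = ['\r'] := rfl
    have e2 : ("\n".toList : List Char) = ['\n'] := rfl
    have e3 : ("<".toList : List Char) = ['<'] := rfl
    have e4 : (">".toList : List Char) = ['>'] := rfl
    have e5 : (" ".toList : List Char) = [' '] := rfl
    rw [e1, e2, e3, e4, e5]
    rw [pvReplace_single, pvReplace_single, pvReplace_single, pvReplace_single]
    exact pvMapG l
  rw [hrep]
  have hgo : PySem.Chars.split₀ ((PySem.Chars.strip r.toList).map pvG)
      = pvFinish ((PySem.Chars.strip r.toList).foldl pvTokStep ([], [])) := by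
    have := pvSplitGo (PySem.Chars.strip r.toList) [] []
    simpa [PySem.Chars.split₀] using this
  rw [hgo, pvFinish_strip]
  congr 1
  simp [List.map_map, Function.comp_def, String.toList_ofList]

theorem pvNorm_empty_iff (r : String) :
    pvNormA (PySem.Str.strip r) = "" ↔ pvTokens r = [] := by
  rw [pvNorm_eq]
  constructor
  · intro h
    by_contra hne
    have hwords : ∀ w ∈ pvFinish (r.toList.foldl pvTokStep ([], [])), w ≠ [] :=
      pvWords_ne_nil r.toList
    have htl : (PySem.Str.join " " (pvTokens r)).toList ≠ [] := by
      rw [PySem.Str.toList_join]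
      apply pvJoin_ne_nil
      · intro w hw
        simp only [pvTokens, List.map_map] at hw
        rcases List.mem_map.mp hw with ⟨w', hw', rfl⟩
        intro hcontra
        exact hwords w' hw' (by simpa using hcontra)
      · simpa [pvTokens] using hne
    exact htl (by rw [h]; rfl)
  · intro h; rw [h]; rfl

theorem pvStrip_empty_tokens (r : String) (h : PySem.Str.strip r = "") : pvTokens r = [] := by
  rw [← pvNorm_empty_iff, h]
  rfl

-- first non-empty normalization in a candidate list, as an Option
def pvFirstNorm? : List String → Option String
  | [] => none
  | v :: rest => if pvNormA v ≠ "" then some (pvNormA v) else pvFirstNorm? rest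

theorem pvScanA_eq_firstNorm (l : List String) :
    pvScanA l = (pvFirstNorm? l).getD "discord-user" := by
  induction l with
  | nil => rfl
  | cons v rest ih =>
      simp only [pvScanA, pvFirstNorm?]
      split_ifs with h <;> simp [ih]

theorem pvFirstNorm?_append (l : List String) (v : String) :
    pvFirstNorm? (l ++ [v]) =
      (match pvFirstNorm? l with
       | some n => some n
       | none => if pvNormA v ≠ "" then some (pvNormA v) else none) := by
  induction l with
  | nil => rfl
  | cons w rest ih =>
      simp only [List.cons_append, pvFirstNorm?]
      by_cases h : pvNormA w ≠ ""
      · simp [h]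
      · simpa [h] using ih

-- A's build-then-scan equals B's fused single pass, for any accumulator already built
theorem pvMain (srcs : List (Option String)) : ∀ acc : List String,
    pvScanA (srcs.foldl pvStepA acc) =
    (match pvFirstNorm? acc with
     | some n => n
     | none => pvFirstName srcs) := by
  induction srcs with
  | nil =>
      intro acc
      simp only [List.foldl_nil, pvScanA_eq_firstNorm, pvFirstName]
      cases pvFirstNorm? acc <;> rfl
  | cons o rest ih =>
      intro acc
      cases o with
      | none => simpa [pvFirstName, pvStepA] using ih acc
      | some r =>
          simp only [List.foldl_cons]
          have hstep : pvStepA acc (some r) =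
              if PySem.Str.strip r ≠ "" then acc ++ [PySem.Str.strip r] else acc := rfl
          by_cases hs : PySem.Str.strip r = ""
          · have htok : pvTokens r = [] := pvStrip_empty_tokens r hs
            rw [hstep, if_neg (by simp [hs]), ih acc]
            have hfn : pvFirstName (some r :: rest) = pvFirstName rest := by
              simp [pvFirstName, htok]
            rw [hfn]
          · rw [hstep, if_pos hs, ih (acc ++ [PySem.Str.strip r]), pvFirstNorm?_append]
            cases hacc : pvFirstNorm? acc with
            | some n => rfl
            | none =>
                by_cases hnn : pvNormA (PySem.Str.strip r) = ""
                · have htok : pvTokens r = [] := (pvNorm_empty_iff r).mp hnn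
                  simp [hnn, pvFirstName, htok]
                · have htok : pvTokens r ≠ [] := fun h => hnn ((pvNorm_empty_iff r).mpr h)
                  have htok' : (pvTokens r).isEmpty = false := by
                    simp [List.isEmpty_eq_false_iff, htok]
                  have hjoin : ¬ PySem.Str.join " " (pvTokens r) = "" := by
                    rw [← pvNorm_eq]; exact hnn
                  simp [hnn, pvFirstName, htok', pvNorm_eq, hjoin]

-- ===== VERDICT (by name: the statement is the Claim_ definition above) =====
theorem display_name_from_message_spec : Claim_equal_display_name_from_message := by
  intro message _
  unfold Spec_display_name_from_message display_name_from_message display_name_from_message_alt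
  rw [pvMain]
  simp [pvFirstNorm?]
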